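-- pv_equiv track=rewrite | github.com/IKAROSOO/CodingTest | Programmers/Lv1 문제/12916_02.py | solution
-- ===== SOURCE A (Python) =====
-- def solution(s):
--     '''주어진 문자열에서 'p'와 'y'의 개수를 대소문자 구분 없이 세어 비교하고,
--     두 개수가 같으면 참, 다르면 거짓을 반환'''
--
--     cnt = 0
--
--     for element in s:
--         if element == "p" or element == "P":
--             cnt += 1
--         elif element == "y" or element == "Y":
--             cnt -= 1
--     else:
--         if not cnt:
--             return True
--         else:
--             return False
-- ===== SOURCE B (Python) =====
-- def solution(s):
--     t = s.lower()
--     return t.count('p') == t.count('y')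
-- ===== Notes on version B (the rewrite author's own statement) =====
-- stated objective: idiomatic
-- what changed: Replaces A's single-pass net counter (+1 on p/P, -1 on y/Y) with lowercasing once and comparing two independent str.count passes.
import Mathlib
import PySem

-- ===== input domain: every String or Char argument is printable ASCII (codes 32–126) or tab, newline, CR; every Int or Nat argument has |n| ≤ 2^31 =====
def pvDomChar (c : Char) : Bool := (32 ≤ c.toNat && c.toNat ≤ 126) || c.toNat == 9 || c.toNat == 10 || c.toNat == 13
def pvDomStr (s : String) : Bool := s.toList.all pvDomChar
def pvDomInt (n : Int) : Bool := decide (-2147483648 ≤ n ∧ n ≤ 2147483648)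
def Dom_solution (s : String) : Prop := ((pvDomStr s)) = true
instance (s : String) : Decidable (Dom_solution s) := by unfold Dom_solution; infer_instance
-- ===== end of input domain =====

-- B lowercases the string once and compares two independent count passes, instead of A's
-- single-pass net counter (+1 on p/P, -1 on y/Y) tested against zero (objective: idiomatic).

-- ===== PORT A =====
-- literal port of A: one fold carrying the net counter cnt, then `not cnt`
def solution (s : String) : Bool :=
  let cnt : Int := s.toList.foldl
    (fun cnt element =>
      if element = 'p' ∨ element = 'P' then cnt + 1
      else if element = 'y' ∨ element = 'Y' then cnt - 1
      else cnt) 0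
  if cnt = 0 then true else false

-- ===== PORT B =====
-- literal port of B: t = s.lower(); t.count('p') == t.count('y')
def solution_alt (s : String) : Bool :=
  let t := PySem.Str.lower s
  PySem.Str.count t "p" == PySem.Str.count t "y"

-- ===== PRECONDITION & SPEC =====
def Spec_solution (s : String) (out : Bool) : Prop := out = solution_alt s
instance (s : String) (out : Bool) : Decidable (Spec_solution s out) := by unfold Spec_solution; infer_instance

-- ===== CLAIM (what is proved, stated in full; the proofs are below) =====
def Claim_equal_solution : Prop := ∀ (s : String), Dom_solution s → Spec_solution s (solution s)

-- ===== LEMMAS AND PROOFS =====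

theorem lowerChar_eq_p (c : Char) : (PySem.Chars.lowerChar c = 'p') ↔ (c = 'p' ∨ c = 'P') := by
  unfold PySem.Chars.lowerChar PySem.Chars.isupper
  split_ifs with h
  · simp only [Bool.and_eq_true, decide_eq_true_eq] at h
    have hle : c.toNat ≤ 90 := by
      have := h.2; change c ≤ Char.ofNat 90 at this; exact_mod_cast this
    have hge : 65 ≤ c.toNat := by
      have := h.1; change Char.ofNat 65 ≤ c at this; exact_mod_cast this
    constructor
    · intro he
      right
      have h1 : (Char.ofNat (c.toNat + 32)).toNat = 112 := by rw [he]; decide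
      rw [Char.toNat_ofNat, if_pos (by left; omega)] at h1
      have : c.toNat = 80 := by omega
      rw [show ('P':Char) = Char.ofNat 80 from rfl, ← this, Char.ofNat_toNat]
    · rintro (h1 | h1) <;> subst h1
      · exact absurd hle (by decide)
      · decide
  · simp only [Bool.and_eq_true, decide_eq_true_eq, not_and_or, not_le] at h
    constructor
    · intro he; left; exact he
    · rintro (h1 | h1); · exact h1
      · subst h1; exfalso
        rcases h with h | h
        · exact absurd h (by decide)
        · exact absurd h (by decide)

theorem lowerChar_eq_y (c : Char) : (PySem.Chars.lowerChar c = 'y') ↔ (c = 'y' ∨ c = 'Y') := by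
  unfold PySem.Chars.lowerChar PySem.Chars.isupper
  split_ifs with h
  · simp only [Bool.and_eq_true, decide_eq_true_eq] at h
    have hle : c.toNat ≤ 90 := by
      have := h.2; change c ≤ Char.ofNat 90 at this; exact_mod_cast this
    have hge : 65 ≤ c.toNat := by
      have := h.1; change Char.ofNat 65 ≤ c at this; exact_mod_cast this
    constructor
    · intro he
      right
      have h1 : (Char.ofNat (c.toNat + 32)).toNat = 121 := by rw [he]; decide
      rw [Char.toNat_ofNat, if_pos (by left; omega)] at h1
      have : c.toNat = 89 := by omega
      rw [show ('Y':Char) = Char.ofNat 89 from rfl, ← this, Char.ofNat_toNat]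
    · rintro (h1 | h1) <;> subst h1
      · exact absurd hle (by decide)
      · decide
  · simp only [Bool.and_eq_true, decide_eq_true_eq, not_and_or, not_le] at h
    constructor
    · intro he; left; exact he
    · rintro (h1 | h1); · exact h1
      · subst h1; exfalso
        rcases h with h | h
        · exact absurd h (by decide)
        · exact absurd h (by decide)

-- Chars.count.go with a single-character needle counts occurrences of that character
theorem go_singleton (c : Char) : ∀ (l : List Char) (acc : Nat),
    PySem.Chars.count.go [c] l.length l acc = acc + l.count c
  | [], acc => by simp [PySem.Chars.count.go]
  | h :: t, acc => by
    rw [show (h :: t).length = t.length + 1 from rfl]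
    rw [PySem.Chars.count.go]
    by_cases hc : c = h
    · subst hc
      simp [List.isPrefixOf, go_singleton c t]
      omega
    · simp [List.isPrefixOf, Ne.symm hc, hc, go_singleton c t]

theorem count_singleton (l : List Char) (c : Char) :
    PySem.Chars.count l [c] = l.count c := by
  simp [PySem.Chars.count, go_singleton]

-- A's net-counter fold equals the difference of the two countP's
theorem foldl_net (l : List Char) (a : Int) :
    l.foldl (fun cnt element =>
      if element = 'p' ∨ element = 'P' then cnt + 1
      else if element = 'y' ∨ element = 'Y' then cnt - 1
      else cnt) a
    = a + (l.countP (fun c => decide (c = 'p' ∨ c = 'P')) : Int)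
        - (l.countP (fun c => decide (c = 'y' ∨ c = 'Y')) : Int) := by
  induction l generalizing a with
  | nil => simp
  | cons h t ih =>
    simp only [List.foldl_cons, List.countP_cons, ih]
    by_cases hp : h = 'p' ∨ h = 'P'
    · have hy : ¬ (h = 'y' ∨ h = 'Y') := by
        rcases hp with h1 | h1 <;> subst h1 <;> decide
      simp [hp, hy]; ring
    · by_cases hy : h = 'y' ∨ h = 'Y'
      · simp [hp, hy]; ring
      · simp [hp, hy]

-- ===== VERDICT (by name: the statement is the Claim_ definition above) =====
theorem solution_spec : Claim_equal_solution := by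
  intro s _
  unfold Spec_solution solution solution_alt
  simp only []
  show (if (s.toList.foldl (fun cnt element => if element = 'p' ∨ element = 'P' then cnt + 1 else if element = 'y' ∨ element = 'Y' then cnt - 1 else cnt) 0 : Int) = 0 then true else false) = (PySem.Str.count (PySem.Str.lower s) "p" == PySem.Str.count (PySem.Str.lower s) "y")
  rw [PySem.Str.count_eq, PySem.Str.count_eq, PySem.Str.toList_lower]
  rw [show ("p" : String).toList = ['p'] from rfl, show ("y" : String).toList = ['y'] from rfl]
  rw [count_singleton, count_singleton]
  unfold PySem.Chars.lower
  rw [List.count_eq_countP, List.count_eq_countP, List.countP_map, List.countP_map]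
  have hcp : List.countP ((fun x => x == 'p') ∘ PySem.Chars.lowerChar) s.toList
      = List.countP (fun c => decide (c = 'p' ∨ c = 'P')) s.toList :=
    List.countP_congr (fun c _ => by
      simp only [Function.comp_apply, beq_iff_eq, decide_eq_true_eq]
      exact lowerChar_eq_p c)
  have hcy : List.countP ((fun x => x == 'y') ∘ PySem.Chars.lowerChar) s.toList
      = List.countP (fun c => decide (c = 'y' ∨ c = 'Y')) s.toList :=
    List.countP_congr (fun c _ => by
      simp only [Function.comp_apply, beq_iff_eq, decide_eq_true_eq]
      exact lowerChar_eq_y c)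
  rw [hcp, hcy]
  rw [foldl_net]
  simp only [zero_add]
  generalize (List.countP (fun c => decide (c = 'p' ∨ c = 'P')) s.toList) = a
  generalize (List.countP (fun c => decide (c = 'y' ∨ c = 'Y')) s.toList) = b
  by_cases h : a = b
  · subst h; simp
  · rw [if_neg (by omega)]
    exact (beq_eq_false_iff_ne.mpr h).symm
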